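-- pv_equiv track=rewrite | github.com/LeeTosti/coding-temple | week 6/lecture notes/monday_whiteboard.py | directions
-- ===== SOURCE A (Python) =====
-- def directions(in_list):
--     out_list = []
--     logic_dict = {'NORTH': 'SOUTH', 'SOUTH': 'NORTH', 'EAST': 'WEST', 'WEST': 'EAST'}
--     for n in in_list:
--         if len(out_list) != 0 and n == logic_dict[out_list[-1]]:
--             out_list.pop()
--         else:
--             out_list.append(n)
--     return out_list
-- ===== SOURCE B (Python) =====
-- def directions(in_list):
--     # Fixpoint cancellation: repeatedly delete adjacent opposite pairs until stable.
--     opp = {'NORTH': 'SOUTH', 'SOUTH': 'NORTH', 'EAST': 'WEST', 'WEST': 'EAST'}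
--     cur = list(in_list)
--     changed = True
--     while changed:
--         changed = False
--         i = 0
--         while i + 1 < len(cur):
--             if opp.get(cur[i]) == cur[i + 1]:
--                 del cur[i:i + 2]
--                 changed = True
--             else:
--                 i += 1
--     return cur
-- ===== Notes on version B (the rewrite author's own statement) =====
-- stated objective: alternative
-- what changed: Replaces the single forward pass with a stack by a fixpoint iteration that repeatedly scans the list and deletes adjacent opposite pairs in place until a full pass removes nothing, relying on confluence of inverse-pair cancellation.
import Mathlib
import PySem

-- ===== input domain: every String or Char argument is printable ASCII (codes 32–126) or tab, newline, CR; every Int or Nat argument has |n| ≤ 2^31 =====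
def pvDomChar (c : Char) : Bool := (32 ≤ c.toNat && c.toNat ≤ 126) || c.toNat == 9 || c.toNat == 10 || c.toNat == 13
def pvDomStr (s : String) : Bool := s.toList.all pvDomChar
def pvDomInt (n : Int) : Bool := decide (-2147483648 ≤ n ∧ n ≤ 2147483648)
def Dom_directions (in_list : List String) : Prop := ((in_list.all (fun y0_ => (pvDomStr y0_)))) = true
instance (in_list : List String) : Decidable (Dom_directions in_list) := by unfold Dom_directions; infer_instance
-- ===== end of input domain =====

-- B replaces A's one-pass stack by a repeated-scan fixpoint that deletes adjacent opposite pairs until stable (objective: alternative; return value only, neither port mutates its input).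

-- ===== PORT A =====
def directions (in_list : List String) : List String :=
  let logic_dict : PySem.Dict String String :=
    PySem.Dict.ofList [("NORTH","SOUTH"),("SOUTH","NORTH"),("EAST","WEST"),("WEST","EAST")]
  in_list.foldl (fun out_list n =>
    match out_list.getLast? with
    | some t => if logic_dict.get? t = some n then out_list.dropLast else out_list ++ [n]
    | none => out_list ++ [n]) []

-- ===== PORT B =====
-- one inner scan of B's while loop: delete adjacent opposite pairs left to right; snd = 'changed'
def passB (d : PySem.Dict String String) : List String → List String × Bool
  | a :: b :: rest =>
    if d.get? a = some b then ((passB d rest).1, true)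
    else
      let p := passB d (b :: rest)
      (a :: p.1, p.2)
  | l => (l, false)

theorem passB_len_le (d : PySem.Dict String String) (l : List String) :
    (passB d l).1.length ≤ l.length := by
  induction l using passB.induct d with
  | case1 a b rest h ih => simp only [List.length_cons] at ih ⊢; simp [passB, h]; omega
  | case2 a b rest h ih => simp only [List.length_cons] at ih ⊢; simp [passB, h]; omega
  | case3 l h =>
    cases l with
    | nil => simp [passB]
    | cons x xs => cases xs with
      | nil => simp [passB]
      | cons y ys => exact (h x y ys rfl).elim

theorem passB_len_lt (d : PySem.Dict String String) (l : List String)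
    (hc : (passB d l).2 = true) : (passB d l).1.length < l.length := by
  induction l using passB.induct d with
  | case1 a b rest h ih =>
    have hle := passB_len_le d rest
    simp [passB, h]; omega
  | case2 a b rest h ih =>
    simp [passB, h] at hc ⊢
    have := ih hc
    simp only [List.length_cons] at this
    omega
  | case3 l h =>
    exfalso
    cases l with
    | nil => simp [passB] at hc
    | cons x xs => cases xs with
      | nil => simp [passB] at hc
      | cons y ys => exact h x y ys rfl

-- B's outer while loop: iterate the scan until a pass changes nothing
def fixB (d : PySem.Dict String String) (cur : List String) : List String :=
  let p := passB d cur
  if h : p.2 = true then fixB d p.1 else cur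
termination_by cur.length
decreasing_by exact passB_len_lt d cur h

def directions_alt (in_list : List String) : List String :=
  let opp : PySem.Dict String String :=
    PySem.Dict.ofList [("NORTH","SOUTH"),("SOUTH","NORTH"),("EAST","WEST"),("WEST","EAST")]
  fixB opp in_list

-- ===== PRECONDITION & SPEC =====
-- Pre_ holds exactly where the Python A returns: every element before the last must be one of
-- the four direction words, otherwise it is pushed and the next iteration's logic_dict lookup
-- on it raises KeyError.
def Pre_directions (in_list : List String) : Prop :=
  ∀ x ∈ in_list.dropLast, x = "NORTH" ∨ x = "SOUTH" ∨ x = "EAST" ∨ x = "WEST"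
instance (in_list : List String) : Decidable (Pre_directions in_list) := by
  unfold Pre_directions; infer_instance
def pvWitness_directions : List String := ["NORTH", "SOUTH", "EAST"]

def Spec_directions (in_list : List String) (out : List String) : Prop := out = directions_alt in_list
instance (in_list : List String) (out : List String) : Decidable (Spec_directions in_list out) := by
  unfold Spec_directions; infer_instance

-- ===== CLAIM (what is proved, stated in full; the proofs are below) =====
def Claim_equal_directions : Prop := ∀ (in_list : List String), Dom_directions in_list → Pre_directions in_list → Spec_directions in_list (directions in_list)

-- ===== LEMMAS AND PROOFS =====

-- closed form of the shared literal dictionary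
def oppF (t : String) : Option String :=
  if "NORTH" = t then some "SOUTH" else if "SOUTH" = t then some "NORTH"
  else if "EAST" = t then some "WEST" else if "WEST" = t then some "EAST" else none

def odly : PySem.Dict String String :=
  PySem.Dict.ofList [("NORTH","SOUTH"),("SOUTH","NORTH"),("EAST","WEST"),("WEST","EAST")]

theorem od_eq (t : String) : odly.get? t = oppF t := by
  by_cases h1 : "NORTH" = t
  · subst h1; decide
  by_cases h2 : "SOUTH" = t
  · subst h2; decide
  by_cases h3 : "EAST" = t
  · subst h3; decide
  by_cases h4 : "WEST" = t
  · subst h4; decide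
  simp [odly, PySem.Dict.ofList, PySem.Dict.update, PySem.Dict.insert, PySem.Dict.empty,
    PySem.Dict.contains, PySem.Dict.get?, oppF, h1, h2, h3, h4]

theorem oppF_inv {t a : String} (h : oppF t = some a) : oppF a = some t := by
  unfold oppF at h ⊢; split_ifs at h <;> (injection h with h; subst h; simp_all)

-- A's stack step, with the stack reversed (top at the head)
def gstep (s : List String) (n : String) : List String :=
  match s with
  | t :: rest => if oppF t = some n then rest else n :: t :: rest
  | [] => [n]

-- reachable stacks never carry an adjacent cancelling pair
def Irred (s : List String) : Prop := List.IsChain (fun a b => oppF b ≠ some a) s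

theorem irred_gstep {s : List String} (n : String) (h : Irred s) : Irred (gstep s n) := by
  cases s with
  | nil => simp [gstep, Irred]
  | cons t rest =>
    by_cases hp : oppF t = some n
    · simpa [gstep, hp] using h.tail
    · unfold Irred at h ⊢
      simp only [gstep, if_neg hp]
      exact List.isChain_cons_cons.mpr ⟨hp, h⟩

theorem gstep_cancel {s : List String} {a b : String}
    (hs : Irred s) (hab : oppF a = some b) : gstep (gstep s a) b = s := by
  cases s with
  | nil => simp [gstep, hab]
  | cons t rest =>
    by_cases hp : oppF t = some a
    · have hbt : b = t := by
        have := oppF_inv hp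
        rw [hab] at this; injection this
      subst hbt
      cases rest with
      | nil => simp [gstep, hp]
      | cons u rs =>
        have hru : oppF u ≠ some b := (List.isChain_cons_cons.mp hs).1
        simp [gstep, hp, hru]
    · simp [gstep, hp, hab]

-- the inner scan does not change the value of the stack reduction
theorem passB_foldl (l : List String) :
    ∀ s : List String, Irred s →
      List.foldl gstep s (passB odly l).1 = List.foldl gstep s l := by
  induction l using passB.induct odly with
  | case1 a b rest h ih =>
    intro s hs
    rw [od_eq] at h
    simp only [passB, od_eq a]
    rw [if_pos h]
    calc List.foldl gstep s (passB odly rest).1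
        = List.foldl gstep s rest := ih s hs
      _ = List.foldl gstep (gstep (gstep s a) b) rest := by rw [gstep_cancel hs h]
  | case2 a b rest h ih =>
    intro s hs
    rw [od_eq] at h
    simp only [passB, od_eq a]
    rw [if_neg h]
    simp only [List.foldl_cons]
    exact ih (gstep s a) (irred_gstep a hs)
  | case3 l h =>
    intro s _; simp [passB]

-- a list the scan leaves unchanged has no adjacent cancelling pair
theorem passB_false_chain (l : List String) (hc : (passB odly l).2 = false) :
    List.IsChain (fun a b => oppF a ≠ some b) l := by
  induction l using passB.induct odly with
  | case1 a b rest h ih => simp [passB, h] at hc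
  | case2 a b rest h ih =>
    rw [od_eq] at h
    simp [passB, od_eq, if_neg h] at hc
    exact List.isChain_cons_cons.mpr ⟨h, ih (by simp [hc])⟩
  | case3 l h => cases l with
    | nil => exact List.isChain_nil
    | cons x xs => cases xs with
      | nil => simp
      | cons y ys => exact (h x y ys rfl).elim

-- a pair-free list just gets pushed element by element
theorem foldl_push (l : List String) :
    ∀ (x : String) (s : List String),
      List.IsChain (fun a b => oppF a ≠ some b) (x :: l) →
      List.foldl gstep (x :: s) l = l.reverse ++ x :: s := by
  induction l with
  | nil => intro x s _; simp
  | cons y ys ih =>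
    intro x s hch
    rcases List.isChain_cons_cons.mp hch with ⟨hxy, hch'⟩
    simp only [List.foldl_cons, gstep, if_neg hxy]
    rw [ih y (x :: s) hch']
    simp

theorem fixB_eq (cur : List String) : fixB odly cur = (List.foldl gstep [] cur).reverse := by
  by_cases hc : (passB odly cur).2 = true
  · rw [fixB]
    simp only [hc, dif_pos]
    rw [fixB_eq (passB odly cur).1, passB_foldl cur [] List.isChain_nil]
  · rw [fixB]
    simp only [hc]
    have hch := passB_false_chain cur (by simpa using hc)
    cases cur with
    | nil => simp
    | cons x xs =>
      simp only [List.foldl_cons, gstep]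
      rw [foldl_push xs x [] hch]
      simp
termination_by cur.length
decreasing_by exact passB_len_lt odly cur hc

-- A's append-at-end stack is the reverse of the head stack
theorem stepA_eq (out : List String) (n : String) :
    (match out.getLast? with
     | some t => if odly.get? t = some n then out.dropLast else out ++ [n]
     | none => out ++ [n]) = (gstep out.reverse n).reverse := by
  induction out using List.reverseRecOn with
  | nil => simp [gstep]
  | append_singleton ys t _ =>
    rw [List.getLast?_concat]
    simp only [List.reverse_append, List.reverse_cons, List.reverse_nil, List.nil_append,
      List.singleton_append, od_eq]
    by_cases hp : oppF t = some n
    · simp [gstep, hp]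
    · simp [gstep, hp]

theorem foldlA_eq (l : List String) :
    ∀ out : List String,
      List.foldl (fun out_list n =>
        match out_list.getLast? with
        | some t => if odly.get? t = some n then out_list.dropLast else out_list ++ [n]
        | none => out_list ++ [n]) out l = (List.foldl gstep out.reverse l).reverse := by
  induction l with
  | nil => intro out; simp
  | cons n ns ih =>
    intro out
    simp only [List.foldl_cons]
    rw [stepA_eq out n, ih, List.reverse_reverse]

-- ===== VERDICT (by name: the statement is the Claim_ definition above) =====
theorem directions_spec : Claim_equal_directions := by
  intro in_list _ _
  unfold Spec_directions
  have hA : directions in_list = List.foldl (fun out_list n =>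
      match out_list.getLast? with
      | some t => if odly.get? t = some n then out_list.dropLast else out_list ++ [n]
      | none => out_list ++ [n]) [] in_list := rfl
  have hB : directions_alt in_list = fixB odly in_list := rfl
  rw [hA, hB, foldlA_eq in_list [], fixB_eq in_list]
  rfl
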